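-- pv_equiv track=rewrite | github.com/Andrey-Kachow/MmmmBoxes | main/app/ocr.py | titled_as_from_whatever
-- ===== SOURCE A (Python) =====
-- MIN_VALUABLE_STR_SIZE = 4
--
-- def get_meaningful_lines(read_data):
--     """Splits the text into lines and removes empty or too short lines"""
--
--     return list(
--         filter(lambda line: len(line) >= MIN_VALUABLE_STR_SIZE, read_data.split("\n"))
--     )
--
-- def titled_as_from_whatever(read_data, matched_name):
--     '''Arguments are the text representation of parcel label and
--     the already matched name
--     Returns the title of the parcel as "From X"'''
--
--     lines = get_meaningful_lines(read_data)
--     line_with_from = None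
--     for line in lines:
--
--         lowercase_line = line.lower()
--
--         if (
--             matched_name
--             and matched_name.lower() in lowercase_line
--             and len(lowercase_line) - len(matched_name) < MIN_VALUABLE_STR_SIZE
--         ):
--             continue
--
--         if line_with_from:
--             return f"From {line}"
--
--         if "from" in lowercase_line:
--             line_with_from = line
--
--     return None
-- ===== SOURCE B (Python) =====
-- MIN_VALUABLE_STR_SIZE = 4
--
-- def titled_as_from_whatever(read_data, matched_name):
--     '''Backward scan: walk the lines right-to-left, remembering the previously
--     seen (i.e. following) kept line; at every "from" line overwrite the answer,
--     so the final answer comes from the first (leftmost) "from" line.'''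
--     ans = None
--     nxt = None
--     for ln in reversed(read_data.split("\n")):
--         if len(ln) < MIN_VALUABLE_STR_SIZE:
--             continue
--         if (
--             matched_name
--             and matched_name.lower() in ln.lower()
--             and len(ln) - len(matched_name) < MIN_VALUABLE_STR_SIZE
--         ):
--             continue
--         if nxt is not None and "from" in ln.lower():
--             ans = "From " + nxt
--         nxt = ln
--     return ans
-- ===== Notes on version B (the rewrite author's own statement) =====
-- stated objective: alternative
-- what changed: Replaces A's forward scan with a remembered flag and early return by a single backward (right-to-left) scan that carries the following kept line and overwrites the answer at each 'from' line, so the last overwrite (the leftmost 'from' line) determines the result.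
import Mathlib
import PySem

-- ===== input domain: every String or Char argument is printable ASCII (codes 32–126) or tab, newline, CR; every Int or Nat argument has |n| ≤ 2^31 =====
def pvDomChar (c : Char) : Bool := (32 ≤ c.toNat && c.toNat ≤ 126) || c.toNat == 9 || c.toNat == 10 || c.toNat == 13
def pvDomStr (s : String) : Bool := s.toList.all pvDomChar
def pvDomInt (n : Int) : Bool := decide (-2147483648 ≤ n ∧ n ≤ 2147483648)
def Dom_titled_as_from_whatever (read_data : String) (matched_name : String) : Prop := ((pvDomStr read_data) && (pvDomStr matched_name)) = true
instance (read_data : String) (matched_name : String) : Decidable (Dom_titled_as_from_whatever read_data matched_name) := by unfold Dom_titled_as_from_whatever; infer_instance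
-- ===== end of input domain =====

-- B replaces A's forward flag-and-early-return scan by a single backward scan that
-- carries the following kept line and overwrites the answer at each "from" line
-- (last overwrite = leftmost "from" line); objective: alternative decomposition.


-- ===== PORT A =====
-- get_meaningful_lines: split on "\n", keep lines of length >= MIN_VALUABLE_STR_SIZE (= 4).
-- Str.split? is total here (separator "\n" is nonempty), so .getD [] is exact.
def pvGetMeaningfulLines (read_data : String) : List String :=
  ((PySem.Str.split? read_data "\n").getD []).filter
    (fun line => decide (4 ≤ PySem.Str.len line))

-- A's for-loop: the skip-continue, the remembered line_with_from, the early return.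
-- Python truthiness of the Optional[str] state: 'if line_with_from' = (st.getD "") ≠ "".
def pvLoopA (matched_name : String) : List String → Option String → Option String
  | [], _ => none
  | line :: rest, st =>
      let lowercase_line := PySem.Str.lower line
      if decide (matched_name ≠ "")
          && PySem.Str.isIn (PySem.Str.lower matched_name) lowercase_line
          && decide (PySem.Str.len lowercase_line - PySem.Str.len matched_name < 4) then
        pvLoopA matched_name rest st
      else if (st.getD "") ≠ "" then
        some ("From " ++ line)
      else if PySem.Str.isIn "from" lowercase_line then
        pvLoopA matched_name rest (some line)
      else
        pvLoopA matched_name rest st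

def titled_as_from_whatever (read_data : String) (matched_name : String) : Option String :=
  pvLoopA matched_name (pvGetMeaningfulLines read_data) none

-- ===== PORT B =====
-- One step of B's reversed loop: state (ans, nxt); the two 'continue's, then the
-- overwrite of ans when nxt exists and the line contains "from", then nxt = ln.
def pvStepB (matched_name : String) (st : Option String × Option String) (ln : String) :
    Option String × Option String :=
  if decide (PySem.Str.len ln < 4) then st
  else if decide (matched_name ≠ "")
      && PySem.Str.isIn (PySem.Str.lower matched_name) (PySem.Str.lower ln)
      && decide (PySem.Str.len ln - PySem.Str.len matched_name < 4) then st
  else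
    ((match st.2 with
      | some nxt =>
          if PySem.Str.isIn "from" (PySem.Str.lower ln) then some ("From " ++ nxt) else st.1
      | none => st.1), some ln)

def titled_as_from_whatever_alt (read_data : String) (matched_name : String) : Option String :=
  ((((PySem.Str.split? read_data "\n").getD []).reverse).foldl
    (pvStepB matched_name) (none, none)).1

-- ===== PRECONDITION & SPEC =====
def Spec_titled_as_from_whatever (read_data : String) (matched_name : String) (out : Option String) : Prop := out = titled_as_from_whatever_alt read_data matched_name
instance (read_data : String) (matched_name : String) (out : Option String) : Decidable (Spec_titled_as_from_whatever read_data matched_name out) := by unfold Spec_titled_as_from_whatever; infer_instance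

-- ===== CLAIM (what is proved, stated in full; the proofs are below) =====
def Claim_equal_titled_as_from_whatever : Prop := ∀ (read_data : String) (matched_name : String), Dom_titled_as_from_whatever read_data matched_name → Spec_titled_as_from_whatever read_data matched_name (titled_as_from_whatever read_data matched_name)

-- ===== LEMMAS AND PROOFS =====
-- A's loop once the matched-name-skipped lines are removed.
def pvLoop2 : List String → Option String → Option String
  | [], _ => none
  | line :: rest, st =>
      if (st.getD "") ≠ "" then some ("From " ++ line)
      else if PySem.Str.isIn "from" (PySem.Str.lower line) then pvLoop2 rest (some line)
      else pvLoop2 rest st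

-- the lines B keeps (both continues false)
def pvKeepB (matched_name : String) (ln : String) : Bool :=
  decide (4 ≤ PySem.Str.len ln)
    && !(decide (matched_name ≠ "")
        && PySem.Str.isIn (PySem.Str.lower matched_name) (PySem.Str.lower ln)
        && decide (PySem.Str.len ln - PySem.Str.len matched_name < 4))

-- B's step on a kept line
def pvCore (st : Option String × Option String) (ln : String) : Option String × Option String :=
  ((match st.2 with
    | some nxt =>
        if PySem.Str.isIn "from" (PySem.Str.lower ln) then some ("From " ++ nxt) else st.1
    | none => st.1), some ln)

theorem pv_len_lower (s : String) : PySem.Str.len (PySem.Str.lower s) = PySem.Str.len s := by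
  simp [PySem.Str.len_eq, PySem.Chars.lower]

theorem pvStepB_eq (mn : String) (st : Option String × Option String) (ln : String) :
    pvStepB mn st ln = if pvKeepB mn ln then pvCore st ln else st := by
  by_cases hk : pvKeepB mn ln = true
  · have hk' := hk
    unfold pvKeepB at hk'
    rw [Bool.and_eq_true, Bool.not_eq_true'] at hk'
    obtain ⟨ha, hb⟩ := hk'
    unfold pvStepB
    rw [if_neg (by simp only [decide_eq_true_eq] at ha ⊢; omega),
        if_neg (by rw [hb]; exact Bool.false_ne_true), if_pos hk]
    rfl
  · unfold pvStepB
    rw [if_neg hk]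
    have hk' := hk
    unfold pvKeepB at hk'
    rw [Bool.and_eq_true, Bool.not_eq_true'] at hk'
    by_cases h1 : decide (PySem.Str.len ln < 4) = true
    · rw [if_pos h1]
    · rw [if_neg h1]
      have ha : decide (4 ≤ PySem.Str.len ln) = true := by
        simp only [decide_eq_true_eq] at h1 ⊢; omega
      have hb : (decide (mn ≠ "")
          && PySem.Str.isIn (PySem.Str.lower mn) (PySem.Str.lower ln)
          && decide (PySem.Str.len ln - PySem.Str.len mn < 4)) = true := by
        rcases Bool.eq_false_or_eq_true (decide (mn ≠ "")
            && PySem.Str.isIn (PySem.Str.lower mn) (PySem.Str.lower ln)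
            && decide (PySem.Str.len ln - PySem.Str.len mn < 4)) with ht | hf
        · exact ht
        · exact absurd ⟨ha, hf⟩ hk' 
      rw [if_pos hb]

theorem pvFoldr_skip (mn : String) (ls : List String)
    (init : Option String × Option String) :
    ls.foldr (fun x s => pvStepB mn s x) init
      = (ls.filter (pvKeepB mn)).foldr (fun x s => pvCore s x) init := by
  induction ls with
  | nil => rfl
  | cons l rest ih =>
    simp only [List.foldr_cons]
    rw [ih, pvStepB_eq, List.filter_cons]
    by_cases h : pvKeepB mn l = true
    · rw [if_pos h, if_pos h, List.foldr_cons]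
    · rw [if_neg h, if_neg h]

theorem pvLoop2_some (rest : List String) (s : String) (hs : s ≠ "") :
    pvLoop2 rest (some s) = rest.head?.map (fun x => "From " ++ x) := by
  cases rest <;> simp [pvLoop2, hs]

-- main invariant: the backward fold over kept lines computes (A's answer, first kept line)
theorem pvFoldr_core (ls : List String) (h : ∀ l ∈ ls, l ≠ "") :
    ls.foldr (fun x s => pvCore s x) (none, none) = (pvLoop2 ls none, ls.head?) := by
  induction ls with
  | nil => simp [pvLoop2]
  | cons l rest ih =>
    have hrest := ih (fun x hx => h x (List.mem_cons_of_mem _ hx))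
    have hl : l ≠ "" := h l (List.mem_cons_self ..)
    simp only [List.foldr_cons, hrest]
    have hstep : pvLoop2 (l :: rest) none =
        (if PySem.Str.isIn "from" (PySem.Str.lower l) = true then pvLoop2 rest (some l)
         else pvLoop2 rest none) := by
      simp [pvLoop2]
    rw [hstep]
    cases rest with
    | nil => simp [pvLoop2, pvCore]
    | cons r rs =>
      simp only [pvCore, List.head?]
      by_cases hf : PySem.Str.isIn "from" (PySem.Str.lower l) = true
      · rw [if_pos hf, if_pos hf, pvLoop2_some (r :: rs) l hl]
        rfl
      · rw [if_neg hf, if_neg hf]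

-- A's loop equals pvLoop2 on the lines B keeps (matched-name skip removed).
theorem pvLoopA_eq_loop2 (mn : String) (ls : List String) (st : Option String)
    (hlen : ∀ l ∈ ls, 4 ≤ PySem.Str.len l) :
    pvLoopA mn ls st
      = pvLoop2 (ls.filter (fun l => !(decide (mn ≠ "")
          && PySem.Str.isIn (PySem.Str.lower mn) (PySem.Str.lower l)
          && decide (PySem.Str.len l - PySem.Str.len mn < 4)))) st := by
  induction ls generalizing st with
  | nil => simp [pvLoopA, pvLoop2]
  | cons l rest ih =>
    have ih' := fun st => ih st (fun x hx => hlen x (List.mem_cons_of_mem _ hx))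
    simp only [pvLoopA, List.filter_cons, pv_len_lower]
    by_cases hskip : (decide (mn ≠ "")
        && PySem.Str.isIn (PySem.Str.lower mn) (PySem.Str.lower l)
        && decide (PySem.Str.len l - PySem.Str.len mn < 4)) = true
    · simp only [hskip, if_pos, Bool.not_true, Bool.false_eq_true, if_false]
      exact ih' st
    · rw [if_neg hskip]
      have hkt : (!(decide (mn ≠ "")
          && PySem.Str.isIn (PySem.Str.lower mn) (PySem.Str.lower l)
          && decide (PySem.Str.len l - PySem.Str.len mn < 4))) = true := by
        rw [Bool.not_eq_true']
        exact Bool.eq_false_iff.mpr hskip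
      rw [if_pos hkt]
      simp only [pvLoop2]
      split_ifs with h1 h2
      · rfl
      · exact ih' (some l)
      · exact ih' st

-- ===== VERDICT (by name: the statement is the Claim_ definition above) =====
theorem titled_as_from_whatever_spec : Claim_equal_titled_as_from_whatever := by
  intro read_data matched_name _
  unfold Spec_titled_as_from_whatever titled_as_from_whatever titled_as_from_whatever_alt
    pvGetMeaningfulLines
  rw [List.foldl_reverse, pvFoldr_skip]
  set raw := (PySem.Str.split? read_data "\n").getD [] with hraw
  have hfilter : raw.filter (pvKeepB matched_name)
      = (raw.filter (fun line => decide (4 ≤ PySem.Str.len line))).filter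
          (fun l => !(decide (matched_name ≠ "")
            && PySem.Str.isIn (PySem.Str.lower matched_name) (PySem.Str.lower l)
            && decide (PySem.Str.len l - PySem.Str.len matched_name < 4))) := by
    rw [List.filter_filter]
    apply List.filter_congr
    intro x _
    simp [pvKeepB, Bool.and_comm]
  have hne : ∀ l ∈ raw.filter (pvKeepB matched_name), l ≠ "" := by
    intro l hl hnil
    have := (List.mem_filter.mp hl).2
    rw [hnil] at this
    simp [pvKeepB, PySem.Str.len_eq] at this
  rw [pvFoldr_core _ hne, hfilter]
  rw [pvLoopA_eq_loop2]
  intro l hl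
  have := (List.mem_filter.mp hl).2
  simpa using this
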